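-- pv_equiv track=rewrite | github.com/BarrettM82A1/Unsw-Study | submission.py | Logarithmic_merge
-- ===== SOURCE A (Python) =====
-- def merge(a,b):
--     a.extend(b)
--     return sorted(a)
--
-- def logic(token,buffer_size,L,Z,index):
--     Z[0] = merge(Z[0],[token])
--     if len(Z[0]) == buffer_size:
--         i=0
--         while True:
--             if i in index:
--                 a = merge(L[i],Z[i])
--                 if len(Z) > i+1:
--                     Z[i+1] = a
--                 else:
--                     Z.append(a)
--                 del index[i]
--             else:
--                 if len(L) >= len(Z):
--                     L[i] = Z[i]
--                 else:
--                     L.append(Z[i])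
--                 index[i] = True
--                 break
--             i+=1
--         Z[0] = []
--
-- def Logarithmic_merge(index, cut_off, buffer_size): # do not change the heading of the function
--     execute_list=index[:cut_off]
--     L =[[]]
--     Z =[[]]
--     index={}
--     result =[]
--     for i in range(len(execute_list)):
--         logic(execute_list[i],buffer_size,L,Z,index)
--     result.append(Z[0])
--     for i in range(len(L)):
--         if i in index:
--              result.append(L[i])
--         else:
--              result.append([])
--     return result
-- ===== SOURCE B (Python) =====
-- def Logarithmic_merge(index, cut_off, buffer_size):
--     tokens = index[:cut_off]
--     if buffer_size < 1:
--         return [sorted(tokens), []]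
--     c = len(tokens) // buffer_size
--     levels = max(1, c.bit_length())
--
--     def runs_desc(i, pos):
--         # runs for levels i-1 .. 0 in descending level order, consuming tokens from pos
--         if i == 0:
--             return [], pos
--         if (c >> (i - 1)) & 1:
--             sz = buffer_size << (i - 1)
--             rest, p = runs_desc(i - 1, pos + sz)
--             return [sorted(tokens[pos:pos + sz])] + rest, p
--         rest, p = runs_desc(i - 1, pos)
--         return [[]] + rest, p
--
--     rd, pos = runs_desc(levels, 0)
--     return [sorted(tokens[pos:])] + rd[::-1]
-- ===== Notes on version B (the rewrite author's own statement) =====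
-- stated objective: alternative
-- what changed: B replaces A's step-by-step simulation of the logarithmic-merge structure (re-sorting the buffer on every token and re-merging runs at every carry through mutable L/Z/index state) by a closed form: the level occupancy is exactly the binary representation of n // buffer_size, so B slices each level's contiguous chunk of the token stream and sorts it once.
import Mathlib
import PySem

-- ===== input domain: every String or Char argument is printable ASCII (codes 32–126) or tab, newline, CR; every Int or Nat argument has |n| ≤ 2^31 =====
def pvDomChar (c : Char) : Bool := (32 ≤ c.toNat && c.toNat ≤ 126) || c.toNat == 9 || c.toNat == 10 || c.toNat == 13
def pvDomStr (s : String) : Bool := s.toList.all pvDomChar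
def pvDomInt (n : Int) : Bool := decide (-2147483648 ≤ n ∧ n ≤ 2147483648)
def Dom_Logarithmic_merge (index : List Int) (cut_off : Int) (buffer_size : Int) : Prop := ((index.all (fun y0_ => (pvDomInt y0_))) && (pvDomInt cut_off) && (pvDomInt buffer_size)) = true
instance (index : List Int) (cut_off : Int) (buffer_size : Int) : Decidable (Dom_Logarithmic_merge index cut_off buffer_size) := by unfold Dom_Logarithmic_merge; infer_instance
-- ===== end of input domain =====

-- B replaces A's step-by-step simulation of the merge cascade (mutable L/Z/index state) by a
-- closed form: level occupancy is the binary representation of n // buffer_size, so each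
-- level's contiguous chunk of the token stream is sliced and sorted exactly once.

-- ===== PORT A =====
-- merge(a, b): a.extend(b); return sorted(a)
def mergeA (a b : List Int) : List Int := PySem.List.sorted (a ++ b) (fun x => x)

def cascadeA (fuel i : Nat) (L Z : List (List Int)) (ix : PySem.Dict Int Bool) :
    List (List Int) × List (List Int) × PySem.Dict Int Bool :=
  match fuel with
  | 0 => (L, Z, ix)
  | fuel + 1 =>
    if ix.contains (i : Int) then
      let a := mergeA (L.getD i []) (Z.getD i [])
      let Z' := if Z.length > i + 1 then Z.set (i + 1) a else Z ++ [a]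
      cascadeA fuel (i + 1) L Z' (ix.erase (i : Int))
    else
      let L' := if L.length ≥ Z.length then L.set i (Z.getD i []) else L ++ [Z.getD i []]
      (L', Z, ix.insert (i : Int) true)

def logicA (token buffer_size : Int)
    (s : List (List Int) × List (List Int) × PySem.Dict Int Bool) :
    List (List Int) × List (List Int) × PySem.Dict Int Bool :=
  let Z := s.2.1.set 0 (mergeA (s.2.1.getD 0 []) [token])
  if ((Z.getD 0 []).length : Int) = buffer_size then
    let r := cascadeA (s.2.2.size + 1) 0 s.1 Z s.2.2
    (r.1, r.2.1.set 0 [], r.2.2)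
  else (s.1, Z, s.2.2)

-- Logarithmic_merge: tokens = index[:cut_off]; fold logic over them; collect Z[0] and the levels
def Logarithmic_merge (index : List Int) (cut_off : Int) (buffer_size : Int) : List (List Int) :=
  let execute_list := PySem.List.slice index none (some cut_off)
  let s := execute_list.foldl (fun s t => logicA t buffer_size s)
      ([[]], [[]], PySem.Dict.empty)
  (s.2.1.getD 0 []) ::
    (List.range s.1.length).map
      (fun i => if s.2.2.contains ((i : Nat) : Int) then s.1.getD i [] else [])

-- ===== PORT B =====
-- runs_desc(i, pos): runs for levels i-1 .. 0 in descending level order, plus the final pos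
def runsDesc (tokens : List Int) (bs c : Nat) : Nat → Nat → List (List Int) × Nat
  | 0, pos => ([], pos)
  | i + 1, pos =>
    if c.testBit i then
      let sz := bs * 2 ^ i
      let r := runsDesc tokens bs c i (pos + sz)
      (PySem.List.sorted ((tokens.drop pos).take sz) (fun x => x) :: r.1, r.2)
    else
      let r := runsDesc tokens bs c i pos
      ([] :: r.1, r.2)

def Logarithmic_merge_alt (index : List Int) (cut_off : Int) (buffer_size : Int) : List (List Int) :=
  let tokens := PySem.List.slice index none (some cut_off)
  if buffer_size < 1 then [PySem.List.sorted tokens (fun x => x), []]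
  else
    let bs := buffer_size.toNat
    let c := tokens.length / bs
    let levels := max 1 (Nat.size c)        -- c.bit_length() = Nat.size c
    let r := runsDesc tokens bs c levels 0
    PySem.List.sorted (tokens.drop r.2) (fun x => x) :: r.1.reverse

-- ===== PRECONDITION & SPEC =====
def Spec_Logarithmic_merge (index : List Int) (cut_off : Int) (buffer_size : Int) (out : List (List Int)) : Prop := out = Logarithmic_merge_alt index cut_off buffer_size
instance (index : List Int) (cut_off : Int) (buffer_size : Int) (out : List (List Int)) : Decidable (Spec_Logarithmic_merge index cut_off buffer_size out) := by unfold Spec_Logarithmic_merge; infer_instance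

-- ===== CLAIM (what is proved, stated in full; the proofs are below) =====
def Claim_equal_Logarithmic_merge : Prop := ∀ (index : List Int) (cut_off : Int) (buffer_size : Int), Dom_Logarithmic_merge index cut_off buffer_size → Spec_Logarithmic_merge index cut_off buffer_size (Logarithmic_merge index cut_off buffer_size)

-- ===== LEMMAS AND PROOFS =====

lemma contains_erase (d : PySem.Dict Int Bool) (k k' : Int) :
    (d.erase k).contains k' = (!(k' == k) && d.contains k') := by
  simp only [PySem.Dict.erase, PySem.Dict.contains, List.any_filter]
  induction d.items with
  | nil => simp
  | cons p l ih =>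
    by_cases hk : k' = k
    · subst hk
      by_cases hp : p.1 = k' <;> simp [List.filter_cons, hp, ih]
    · have hkk : (k' == k) = false := beq_eq_false_iff_ne.2 hk
      by_cases hp : p.1 = k
      · simp [hp, hkk, ih]
        exact fun h => absurd h.symm hk
      · have hpn : (p.1 == k) = false := beq_eq_false_iff_ne.2 hp
        simp [hpn, hkk, ih]

lemma nodup_keys_erase (d : PySem.Dict Int Bool) (k : Int) (h : d.keys.Nodup) :
    (d.erase k).keys.Nodup := by
  have hsub : (d.erase k).keys.Sublist d.keys :=
    List.Sublist.map _ (List.filter_sublist (l := d.items))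
  exact hsub.nodup h

lemma bits_low {c i : Nat} (h : ∀ j < i, c.testBit j = true) : c % 2 ^ i = 2 ^ i - 1 := by
  induction i with
  | zero => simp [Nat.mod_one]
  | succ i ih =>
    have h1 : c % 2 ^ i = 2 ^ i - 1 := ih (fun j hj => h j (Nat.lt_succ_of_lt hj))
    have h2 : c / 2 ^ i % 2 = 1 := by
      have := h i (Nat.lt_succ_self i)
      rw [Nat.testBit_eq_decide_div_mod_eq] at this
      exact of_decide_eq_true this
    have h3 : c % (2 ^ i * 2) = c % 2 ^ i + 2 ^ i * (c / 2 ^ i % 2) := Nat.mod_mul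
    have hp : (0:Nat) < 2 ^ i := Nat.two_pow_pos i
    rw [pow_succ, h3, h1, h2]
    omega

lemma testBit_of_rep {c i q : Nat} (hrep : c + 1 = 2 ^ (i + 1) * q + 2 ^ i) :
    (∀ j < i, (c + 1).testBit j = false) ∧ (c + 1).testBit i = true ∧
      (∀ j, i < j → (c + 1).testBit j = c.testBit j) := by
  refine ⟨?_, ?_, ?_⟩
  · intro j hj
    rw [Nat.testBit_eq_decide_div_mod_eq]
    obtain ⟨d, hd⟩ : ∃ d, i - j - 1 + 1 = i - j := ⟨i - j - 1, by omega⟩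
    have h1 : c + 1 = 2 ^ j * (2 * (2 ^ (i - j) * q + 2 ^ (i - j - 1))) := by
      rw [hrep]
      have e1 : (2:Nat) ^ (i + 1) = 2 ^ j * (2 * 2 ^ (i - j)) := by
        rw [← pow_succ', ← pow_add]; congr 1; omega
      have e2 : (2:Nat) ^ i = 2 ^ j * (2 * 2 ^ (i - j - 1)) := by
        rw [← pow_succ', ← pow_add]; congr 1; omega
      rw [e1, e2]; ring
    rw [h1, Nat.mul_div_cancel_left _ (Nat.two_pow_pos j)]
    simp [Nat.mul_mod_right]
  · rw [Nat.testBit_eq_decide_div_mod_eq]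
    have h1 : c + 1 = 2 ^ i * (2 * q + 1) := by
      rw [hrep, pow_succ]; ring
    rw [h1, Nat.mul_div_cancel_left _ (Nat.two_pow_pos i)]
    simp [Nat.add_mul_mod_self_left]
  · intro j hj
    rw [Nat.testBit_eq_decide_div_mod_eq, Nat.testBit_eq_decide_div_mod_eq]
    have hp : (0:Nat) < 2 ^ i := Nat.two_pow_pos i
    have e1 : (c + 1) / 2 ^ (i + 1) = q := by
      rw [hrep, Nat.mul_add_div (Nat.two_pow_pos (i+1)),
        Nat.div_eq_of_lt (Nat.pow_lt_pow_right (by norm_num) (Nat.lt_succ_self i))]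
      omega
    have e2 : c / 2 ^ (i + 1) = q := by
      have hc : c = 2 ^ (i + 1) * q + (2 ^ i - 1) := by omega
      rw [hc, Nat.mul_add_div (Nat.two_pow_pos (i+1)), Nat.div_eq_of_lt]
      · simp
      · calc 2 ^ i - 1 < 2 ^ i := by omega
          _ < 2 ^ (i + 1) := Nat.pow_lt_pow_right (by norm_num) (Nat.lt_succ_self i)
    have hj2 : (2:Nat) ^ j = 2 ^ (i + 1) * 2 ^ (j - (i + 1)) := by
      rw [← pow_add]; congr 1; omega
    rw [hj2, ← Nat.div_div_eq_div_mul, ← Nat.div_div_eq_div_mul, e1, e2]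

lemma two_pow_le_of_testBit {c i : Nat} (h : c.testBit i = true) : 2 ^ i ≤ c := by
  rw [Nat.testBit_eq_decide_div_mod_eq] at h
  have h1 : c / 2 ^ i % 2 = 1 := of_decide_eq_true h
  have h2 : 1 ≤ c / 2 ^ i := by
    rcases Nat.eq_zero_or_pos (c / 2 ^ i) with h0 | h0
    · rw [h0] at h1; simp at h1
    · exact h0
  calc 2 ^ i = 2 ^ i * 1 := by ring
    _ ≤ 2 ^ i * (c / 2 ^ i) := Nat.mul_le_mul_left _ h2
    _ ≤ c := Nat.mul_div_le c (2 ^ i)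

lemma div_eq_of_rep {c i q : Nat} (hrep : c + 1 = 2 ^ (i + 1) * q + 2 ^ i) :
    ∀ j, i < j → (c + 1) / 2 ^ j = c / 2 ^ j := by
  intro j hj
  have hp : (0:Nat) < 2 ^ i := Nat.two_pow_pos i
  have e1 : (c + 1) / 2 ^ (i + 1) = q := by
    rw [hrep, Nat.mul_add_div (Nat.two_pow_pos (i+1)),
      Nat.div_eq_of_lt (Nat.pow_lt_pow_right (by norm_num) (Nat.lt_succ_self i))]
    omega
  have e2 : c / 2 ^ (i + 1) = q := by
    have hc : c = 2 ^ (i + 1) * q + (2 ^ i - 1) := by omega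
    rw [hc, Nat.mul_add_div (Nat.two_pow_pos (i+1)), Nat.div_eq_of_lt]
    · simp
    · calc 2 ^ i - 1 < 2 ^ i := by omega
        _ < 2 ^ (i + 1) := Nat.pow_lt_pow_right (by norm_num) (Nat.lt_succ_self i)
  have hj2 : (2:Nat) ^ j = 2 ^ (i + 1) * 2 ^ (j - (i + 1)) := by
    rw [← pow_add]; congr 1; omega
  rw [hj2, ← Nat.div_div_eq_div_mul, ← Nat.div_div_eq_div_mul, e1, e2]

lemma div_succ_pow_eq {c i : Nat} (hlo : ∀ j < i, c.testBit j = true)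
    (hbit : c.testBit i = true) : 2 ^ (i + 1) * (c / 2 ^ (i + 1)) + 2 ^ (i + 1) = c + 1 := by
  have hmod : c % 2 ^ (i + 1) = 2 ^ (i + 1) - 1 := by
    apply bits_low
    intro j hj
    rcases Nat.lt_or_ge j i with h | h
    · exact hlo j h
    · have : j = i := by omega
      rw [this]; exact hbit
  have hdm : 2 ^ (i + 1) * (c / 2 ^ (i + 1)) + c % 2 ^ (i + 1) = c := Nat.div_add_mod c _
  have hp : (0:Nat) < 2 ^ (i + 1) := Nat.two_pow_pos _
  omega

def sortedI (xs : List Int) : List Int := PySem.List.sorted xs (fun x => x)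

lemma sortedI_perm_eq {xs ys : List Int} (h : xs.Perm ys) : sortedI xs = sortedI ys :=
  PySem.List.sorted_eq_sorted_of_perm xs ys (fun x => x) (fun _ _ h => h) h

lemma length_sortedI (xs : List Int) : (sortedI xs).length = xs.length :=
  PySem.List.length_sorted xs (fun x => x) false

def chunk (tk : List Int) (bs c j : Nat) : List Int :=
  (tk.drop (bs * (2 ^ (j + 1) * (c / 2 ^ (j + 1))))).take (bs * 2 ^ j)

lemma getD_set_self {l : List (List Int)} {i : Nat} {v : List Int} (h : i < l.length) :
    (l.set i v).getD i [] = v := by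
  simp [List.getD_eq_getElem?_getD, List.getElem?_set, h]

lemma getD_set_ne {l : List (List Int)} {i j : Nat} {v : List Int} (h : i ≠ j) :
    (l.set i v).getD j [] = l.getD j [] := by
  simp [List.getD_eq_getElem?_getD, List.getElem?_set, h]

lemma getD_append_len {l : List (List Int)} {v : List Int} :
    (l ++ [v]).getD l.length [] = v := by
  simp [List.getD_eq_getElem?_getD]

lemma getD_append_at {l : List (List Int)} {v : List Int} {j : Nat} (h : j = l.length) :
    (l ++ [v]).getD j [] = v := by
  subst h; exact getD_append_len

lemma mergeA_eq (a b : List Int) : mergeA a b = sortedI (a ++ b) := rfl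

lemma mergeA_sorted (x y : List Int) : mergeA (sortedI x) (sortedI y) = sortedI (x ++ y) := by
  rw [mergeA_eq]
  exact sortedI_perm_eq ((PySem.List.sorted_perm x _ false).append (PySem.List.sorted_perm y _ false))

def StInv (bs : Nat) (done : List Int) (L Z : List (List Int)) (ix : PySem.Dict Int Bool) : Prop :=
  L.length = max 1 (Nat.size (done.length / bs)) ∧
  Z.length = max 1 (Nat.size (done.length / bs)) ∧
  Z.getD 0 [] = sortedI (done.drop (bs * (done.length / bs))) ∧
  ix.keys.Nodup ∧
  (∀ j : Nat, ix.contains (j : Int) = (done.length / bs).testBit j) ∧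
  (∀ j : Nat, (done.length / bs).testBit j = true →
    L.getD j [] = sortedI (chunk done bs (done.length / bs) j))

lemma chunk_append {done : List Int} {t : Int} {bs c j : Nat} (hbs : 1 ≤ bs)
    (hc : bs * c ≤ done.length) (hbit : c.testBit j = true) :
    chunk (done ++ [t]) bs c j = chunk done bs c j := by
  have h1 : 2 ^ (j + 1) * (c / 2 ^ (j + 1)) + 2 ^ j ≤ c := by
    have hdm : 2 ^ (j + 1) * (c / 2 ^ (j + 1)) + c % 2 ^ (j + 1) = c := Nat.div_add_mod c _
    have hmm : c % 2 ^ (j + 1) = c % 2 ^ j + 2 ^ j * (c / 2 ^ j % 2) := by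
      rw [pow_succ]; exact Nat.mod_mul
    have hb : c / 2 ^ j % 2 = 1 := by
      rw [Nat.testBit_eq_decide_div_mod_eq] at hbit
      exact of_decide_eq_true hbit
    rw [hb, Nat.mul_one] at hmm
    omega
  have h2 : bs * (2 ^ (j + 1) * (c / 2 ^ (j + 1))) + bs * 2 ^ j ≤ bs * c := by
    calc bs * (2 ^ (j + 1) * (c / 2 ^ (j + 1))) + bs * 2 ^ j
        = bs * (2 ^ (j + 1) * (c / 2 ^ (j + 1)) + 2 ^ j) := by rw [Nat.mul_add]
      _ ≤ bs * c := Nat.mul_le_mul_left bs h1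
  simp only [chunk]
  rw [List.drop_append_of_le_length (by omega)]
  rw [List.take_append_of_le_length]
  rw [List.length_drop]
  omega

lemma cascade_spec (bs : Nat) (hbs : 1 ≤ bs) (done' : List Int) (c : Nat)
    (hn : done'.length = bs * (c + 1)) :
    ∀ (fuel i : Nat) (L Z : List (List Int)) (ix : PySem.Dict Int Bool),
    (∃ j, i ≤ j ∧ j < i + fuel ∧ c.testBit j = false) →
    (∀ j < i, c.testBit j = true) →
    L.length = max 1 (Nat.size c) →
    Z.length = max (max 1 (Nat.size c)) (i + 1) →
    Z.getD i [] = sortedI (done'.drop (done'.length - bs * 2 ^ i)) →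
    ix.keys.Nodup →
    (∀ j : Nat, ix.contains (j : Int) = (decide (i ≤ j) && c.testBit j)) →
    (∀ j : Nat, i ≤ j → c.testBit j = true → L.getD j [] = sortedI (chunk done' bs c j)) →
    (cascadeA fuel i L Z ix).1.length = max 1 (Nat.size (c + 1)) ∧
    (cascadeA fuel i L Z ix).2.1.length = max 1 (Nat.size (c + 1)) ∧
    (cascadeA fuel i L Z ix).2.2.keys.Nodup ∧
    (∀ j : Nat, (cascadeA fuel i L Z ix).2.2.contains (j : Int) = (c + 1).testBit j) ∧
    (∀ j : Nat, (c + 1).testBit j = true →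
      (cascadeA fuel i L Z ix).1.getD j [] = sortedI (chunk done' bs (c + 1) j)) := by
  intro fuel
  induction fuel with
  | zero =>
    intro i L Z ix hex
    obtain ⟨j, h1, h2, _⟩ := hex
    omega
  | succ fuel ih =>
    intro i L Z ix hex hlo hL hZ hZi hnd hix hLc
    set m := max 1 (Nat.size c) with hm
    have hple : ∀ j : Nat, c.testBit j = true → j < Nat.size c := by
      intro j hj
      exact Nat.lt_size.2 (two_pow_le_of_testBit hj)
    by_cases hbit : c.testBit i = true
    · -- carry: i ∈ index
      have hcont : ix.contains (i : Int) = true := by rw [hix i]; simp [hbit]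
      have hisz : i < Nat.size c := hple i hbit
      have hmsz : m = Nat.size c := by omega
      have hip1 : i + 1 ≤ m := by omega
      set q := c / 2 ^ (i + 1) with hq
      have hrep : 2 ^ (i + 1) * q + 2 ^ (i + 1) = c + 1 := div_succ_pow_eq hlo hbit
      have hpi : (0:Nat) < 2 ^ i := Nat.two_pow_pos i
      have hpow : (2:Nat) ^ (i + 1) = 2 ^ i + 2 ^ i := by rw [pow_succ]; omega
      have hchunk_i : chunk done' bs c i = (done'.drop (bs * (2 ^ (i + 1) * q))).take (bs * 2 ^ i) := rfl
      have hlen_split : bs * (2 ^ (i + 1) * q) + bs * 2 ^ i + bs * 2 ^ i = done'.length := by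
        have h5 : bs * (2 ^ (i + 1) * q) + bs * 2 ^ i + bs * 2 ^ i
            = bs * (2 ^ (i + 1) * q + 2 ^ (i + 1)) := by rw [hpow]; ring
        rw [h5, hrep, hn]
      have hZi' : Z.getD i [] = sortedI (done'.drop (bs * (2 ^ (i + 1) * q) + bs * 2 ^ i)) := by
        rw [hZi]; congr 2; omega
      have ha : mergeA (L.getD i []) (Z.getD i []) = sortedI (done'.drop (bs * (2 ^ (i + 1) * q))) := by
        rw [hLc i (Nat.le_refl i) hbit, hZi', hchunk_i]
        rw [mergeA_sorted]
        congr 1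
        rw [← List.drop_drop (i := bs * 2 ^ i) (j := bs * (2 ^ (i + 1) * q))]
        exact List.take_append_drop _ _
      set a := mergeA (L.getD i []) (Z.getD i []) with hadef
      set Z' := if Z.length > i + 1 then Z.set (i + 1) a else Z ++ [a] with hZ'def
      have hstep : cascadeA (fuel + 1) i L Z ix = cascadeA fuel (i + 1) L Z' (ix.erase (i : Int)) := by
        simp only [cascadeA, hcont, if_true]
        rfl
      rw [hstep]
      have hZ'len : Z'.length = max m (i + 1 + 1) := by
        rw [hZ'def]
        by_cases hc2 : Z.length > i + 1
        · rw [if_pos hc2]; rw [List.length_set]; omega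
        · rw [if_neg hc2]; simp only [List.length_append, List.length_singleton]; omega
      have hZ'get : Z'.getD (i + 1) [] = a := by
        rw [hZ'def]
        by_cases hc2 : Z.length > i + 1
        · rw [if_pos hc2]; exact getD_set_self (by omega)
        · rw [if_neg hc2]
          have h6 : Z.length = i + 1 := by omega
          rw [← h6]; exact getD_append_len
      apply ih (i + 1) L Z' (ix.erase (i : Int))
      · obtain ⟨j, hj1, hj2, hj3⟩ := hex
        have h7 : j ≠ i := by
          intro h
          rw [h, hbit] at hj3
          exact Bool.noConfusion hj3
        exact ⟨j, by omega, by omega, hj3⟩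
      · intro j hj
        rcases Nat.lt_or_ge j i with h | h
        · exact hlo j h
        · have h8 : j = i := by omega
          rw [h8]; exact hbit
      · exact hL
      · rw [hZ'len]
      · rw [hZ'get, ha]
        have hsum : bs * 2 ^ (i + 1) = bs * 2 ^ i + bs * 2 ^ i := by rw [hpow, Nat.mul_add]
        congr 2
        omega
      · exact nodup_keys_erase ix _ hnd
      · intro j
        rw [contains_erase, hix j]
        by_cases hji : j = i
        · subst hji
          simp
        · have h9 : ((j : Int) == (i : Int)) = false := by
            rw [beq_eq_false_iff_ne]
            exact fun h => hji (Int.natCast_inj.mp h)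
          rw [h9]
          simp only [Bool.not_false, Bool.true_and]
          congr 1
          exact decide_eq_decide.mpr (by omega)
      · intro j hj hbj
        exact hLc j (by omega) hbj
    · -- break: i ∉ index
      have hbitf : c.testBit i = false := by
        cases h : c.testBit i
        · rfl
        · exact absurd h hbit
      have hcont : ix.contains (i : Int) = false := by rw [hix i]; simp [hbitf]
      have hpi : (0:Nat) < 2 ^ i := Nat.two_pow_pos i
      have hpi1 : (0:Nat) < 2 ^ (i + 1) := Nat.two_pow_pos (i + 1)
      set q := c / 2 ^ (i + 1) with hq
      have hmod_i : c % 2 ^ i = 2 ^ i - 1 := bits_low hlo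
      have hmod_i1 : c % 2 ^ (i + 1) = 2 ^ i - 1 := by
        have h3 : c % (2 ^ i * 2) = c % 2 ^ i + 2 ^ i * (c / 2 ^ i % 2) := Nat.mod_mul
        have h2 : c / 2 ^ i % 2 = 0 := by
          rw [Nat.testBit_eq_decide_div_mod_eq] at hbitf
          have := of_decide_eq_false hbitf
          omega
        rw [pow_succ, h3, h2, hmod_i]
        omega
      have hdm : 2 ^ (i + 1) * q + c % 2 ^ (i + 1) = c := Nat.div_add_mod c _
      have hrep : c + 1 = 2 ^ (i + 1) * q + 2 ^ i := by omega
      obtain ⟨hb1, hb2, hb3⟩ := testBit_of_rep hrep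
      have hdiv := div_eq_of_rep hrep
      have hq1 : (c + 1) / 2 ^ (i + 1) = q := by
        rw [hrep, Nat.mul_add_div hpi1, Nat.div_eq_of_lt]
        · omega
        · rw [pow_succ]; omega
      have hval : sortedI (done'.drop (done'.length - bs * 2 ^ i)) = sortedI (chunk done' bs (c + 1) i) := by
        congr 1
        have hofs : bs * (2 ^ (i + 1) * ((c + 1) / 2 ^ (i + 1))) = done'.length - bs * 2 ^ i := by
          rw [hq1, hn]
          have h1 : bs * (c + 1) = bs * (2 ^ (i + 1) * q) + bs * 2 ^ i := by
            rw [hrep]; ring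
          omega
        rw [chunk, hofs]
        rw [List.take_of_length_le]
        rw [List.length_drop]
        omega
      have hstep : cascadeA (fuel + 1) i L Z ix
          = (if L.length ≥ Z.length then L.set i (Z.getD i []) else L ++ [Z.getD i []], Z,
             ix.insert (i : Int) true) := by
        simp only [cascadeA, hcont, Bool.false_eq_true, if_false]
      rw [hstep]
      have hcontains : ∀ j : Nat, (ix.insert (i : Int) true).contains (j : Int) = (c + 1).testBit j := by
        intro j
        rw [PySem.Dict.contains_insert, hix j]
        by_cases hji : j = i
        · subst hji
          simp [hb2]
        · have hne : ((j : Int) == (i : Int)) = false := by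
            rw [beq_eq_false_iff_ne]
            exact fun h => hji (Int.natCast_inj.mp h)
          rw [hne]
          rcases Nat.lt_or_ge j i with h | h
          · rw [hb1 j h]
            simp [show ¬(i ≤ j) by omega]
          · have hgt : i < j := by omega
            rw [hb3 j hgt]
            simp [show i ≤ j by omega]
      rcases Nat.lt_or_ge i (Nat.size c) with hisz | hisz
      · -- interior zero: L[i] := Z[i]
        have hmsz : m = Nat.size c := by omega
        have hclt : c < 2 ^ Nat.size c := Nat.size_le.1 (Nat.le_refl _)
        have hne_top : c + 1 < 2 ^ Nat.size c := by
          rcases Nat.lt_or_ge (c + 1) (2 ^ Nat.size c) with h | h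
          · exact h
          · exfalso
            have hceq : c = 2 ^ Nat.size c - 1 := by omega
            have h10 := Nat.testBit_two_pow_sub_one (Nat.size c) i
            rw [← hceq] at h10
            rw [h10] at hbitf
            simp at hbitf
            omega
        have hsz1 : Nat.size (c + 1) ≤ Nat.size c := Nat.size_le.2 hne_top
        have hsz2 : Nat.size c ≤ Nat.size (c + 1) := Nat.size_le_size (by omega)
        have hszeq : Nat.size (c + 1) = Nat.size c := by omega
        have hcond : L.length ≥ Z.length := by omega
        rw [if_pos hcond]
        refine ⟨?_, ?_, PySem.Dict.nodup_keys_insert _ _ _ hnd, hcontains, ?_⟩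
        · dsimp only; rw [List.length_set]; omega
        · dsimp only; omega
        · dsimp only
          intro j hbj
          by_cases hji : j = i
          · subst hji
            rw [getD_set_self (by omega), hZi, hval]
          · rcases Nat.lt_or_ge j i with h | h
            · rw [hb1 j h] at hbj; exact Bool.noConfusion hbj
            · have hgt : i < j := by omega
              rw [getD_set_ne (Ne.symm hji)]
              rw [hb3 j hgt] at hbj
              rw [hLc j (by omega) hbj]
              simp only [chunk, hdiv (j + 1) (by omega)]
      · -- c is all ones below i: append level
        have hclt : c < 2 ^ i := by
          have h1 : c < 2 ^ Nat.size c := Nat.size_le.1 (Nat.le_refl _)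
          have h2 : (2:Nat) ^ Nat.size c ≤ 2 ^ i := Nat.pow_le_pow_right (by norm_num) hisz
          omega
        have hceq : c = 2 ^ i - 1 := by
          rw [← Nat.mod_eq_of_lt hclt, hmod_i]
        have hcp : c + 1 = 2 ^ i := by omega
        have hszc1 : Nat.size (c + 1) = i + 1 := by rw [hcp]; exact Nat.size_pow
        have hmi : m ≤ i ∨ (c = 0 ∧ i = 0) := by
          rcases Nat.eq_zero_or_pos c with h0 | h0
          · rcases Nat.eq_zero_or_pos i with hi0 | hi0
            · right; exact ⟨h0, hi0⟩
            · left
              have h11 : Nat.size c = 0 := by rw [h0]; exact Nat.size_zero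
              omega
          · left
            have h12 : 1 ≤ Nat.size c := Nat.lt_size.2 (by omega)
            omega
        rcases hmi with hmi | ⟨hc0, hi0⟩
        · have hLlen : L.length = i := by
            have h1 : 1 ≤ i := by omega
            have h2 : 2 ^ (i - 1) ≤ c := by
              have h13 : (2:Nat) ^ (i - 1) < 2 ^ i := Nat.pow_lt_pow_right (by norm_num) (by omega)
              omega
            have h3 : i - 1 < Nat.size c := Nat.lt_size.2 h2
            omega
          have hcond : ¬ L.length ≥ Z.length := by omega
          rw [if_neg hcond]
          refine ⟨?_, ?_, PySem.Dict.nodup_keys_insert _ _ _ hnd, hcontains, ?_⟩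
          · dsimp only; simp only [List.length_append, List.length_singleton]; omega
          · dsimp only; omega
          · dsimp only
            intro j hbj
            by_cases hji : j = i
            · subst hji
              rw [getD_append_at hLlen.symm, hZi, hval]
            · exfalso
              rcases Nat.lt_or_ge j i with h | h
              · rw [hb1 j h] at hbj; exact Bool.noConfusion hbj
              · have hgt : i < j := by omega
                rw [hb3 j hgt] at hbj
                have h14 := two_pow_le_of_testBit hbj
                have h15 : (2:Nat) ^ i < 2 ^ j := Nat.pow_lt_pow_right (by norm_num) hgt
                omega
        · -- c = 0, i = 0
          subst hc0 hi0
          have hsz0 : Nat.size 0 = 0 := Nat.size_zero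
          have hsz1 : Nat.size 1 = 1 := by
            have h1 : Nat.size 1 ≤ 1 := Nat.size_le.2 (by norm_num)
            have h2 : 0 < Nat.size 1 := Nat.lt_size.2 (by norm_num)
            omega
          have hcond : L.length ≥ Z.length := by omega
          rw [if_pos hcond]
          refine ⟨?_, ?_, PySem.Dict.nodup_keys_insert _ _ _ hnd, hcontains, ?_⟩
          · dsimp only; rw [List.length_set]; omega
          · dsimp only; omega
          · dsimp only
            intro j hbj
            by_cases hji : j = 0
            · subst hji
              rw [getD_set_self (by omega), hZi, hval]
            · exfalso
              have hgt : 0 < j := by omega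
              rw [hb3 j hgt] at hbj
              simp [Nat.zero_testBit] at hbj

lemma step_spec (B : Int) (hbs : 1 ≤ B) (done : List Int) (t : Int)
    (L Z : List (List Int)) (ix : PySem.Dict Int Bool)
    (h : StInv B.toNat done L Z ix) :
    StInv B.toNat (done ++ [t]) (logicA t B (L, Z, ix)).1 (logicA t B (L, Z, ix)).2.1
      (logicA t B (L, Z, ix)).2.2 := by
  obtain ⟨hL, hZ, hZ0, hnd, hix, hLc⟩ := h
  set bs := B.toNat with hbsdef
  have hbs1 : 1 ≤ bs := by omega
  have hBeq : B = (bs : Int) := by omega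
  set n := done.length with hndef
  set c := n / bs with hcdef
  set r := n % bs with hrdef
  have hdm : bs * c + r = n := Nat.div_add_mod n bs
  have hrlt : r < bs := Nat.mod_lt n (by omega)
  have hZpos : 0 < Z.length := by rw [hZ]; omega
  set Z1 := Z.set 0 (mergeA (Z.getD 0 []) [t]) with hZ1def
  have hZ1get : Z1.getD 0 [] = sortedI (done.drop (bs * c) ++ [t]) := by
    rw [hZ1def, getD_set_self hZpos, hZ0, mergeA_eq]
    exact sortedI_perm_eq ((PySem.List.sorted_perm _ _ false).append (List.Perm.refl [t]))
  have hZ1len : Z1.length = Z.length := List.length_set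
  have hdroplen : (done.drop (bs * c)).length = r := by
    rw [List.length_drop]; omega
  have hlen1 : (Z1.getD 0 []).length = r + 1 := by
    rw [hZ1get, length_sortedI, List.length_append, hdroplen, List.length_singleton]
  have hdrop_app : (done ++ [t]).drop (bs * c) = done.drop (bs * c) ++ [t] :=
    List.drop_append_of_le_length (by omega)
  by_cases htr : r + 1 = bs
  · -- flush
    have hcond : (((Z1.getD 0 []).length : Nat) : Int) = B := by
      rw [hlen1, hBeq]
      exact_mod_cast congrArg (Nat.cast : Nat → Int) htr
    have hstep : logicA t B (L, Z, ix)
        = ((cascadeA (ix.size + 1) 0 L Z1 ix).1,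
           (cascadeA (ix.size + 1) 0 L Z1 ix).2.1.set 0 [],
           (cascadeA (ix.size + 1) 0 L Z1 ix).2.2) := by
      simp only [logicA]
      rw [← hZ1def, if_pos hcond]
    have hn' : (done ++ [t]).length = bs * (c + 1) := by
      simp only [List.length_append, List.length_singleton]
      have : bs * (c + 1) = bs * c + bs := by rw [Nat.mul_add]; omega
      omega
    have hc' : (done ++ [t]).length / bs = c + 1 := by
      rw [hn', Nat.mul_div_cancel_left _ (by omega : 0 < bs)]
    -- a zero bit within fuel reach
    have hexist : ∃ j, c.testBit j = false :=
      ⟨Nat.size c, Nat.testBit_lt_two_pow (Nat.size_le.1 (Nat.le_refl _))⟩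
    obtain ⟨t0, ht0f, ht0lo⟩ : ∃ t0, c.testBit t0 = false ∧ ∀ j < t0, c.testBit j = true := by
      refine ⟨Nat.find hexist, Nat.find_spec hexist, ?_⟩
      intro j hj
      have hmin := Nat.find_min hexist hj
      cases h : c.testBit j
      · exact absurd h hmin
      · rfl
    have ht0size : t0 ≤ ix.size := by
      have hmap : ((List.range t0).map (fun j : Nat => (j : Int))).Nodup :=
        List.Nodup.map Nat.cast_injective List.nodup_range
      have hsub : ((List.range t0).map (fun j : Nat => (j : Int))) ⊆ ix.keys := by
        intro x hx
        obtain ⟨j, hj, rfl⟩ := List.mem_map.mp hx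
        have hjlt : j < t0 := List.mem_range.mp hj
        exact (PySem.Dict.contains_iff_mem_keys ix _).mp (by rw [hix j, ht0lo j hjlt])
      have hle := (List.subperm_of_subset hmap hsub).length_le
      simp only [List.length_map, List.length_range] at hle
      have hkeys : ix.keys.length = ix.size := by
        simp [PySem.Dict.keys, PySem.Dict.size]
      omega
    have hcas := cascade_spec bs hbs1 (done ++ [t]) c hn' (ix.size + 1) 0 L Z1 ix
      ⟨t0, Nat.zero_le _, by omega, ht0f⟩
      (by intro j hj; omega)
      hL
      (by rw [hZ1len, hZ]; omega)
      (by have hidx : (done ++ [t]).length - bs * 2 ^ 0 = bs * c := by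
            rw [hn', pow_zero]
            have h9 : bs * (c + 1) = bs * c + bs * 1 := Nat.mul_add bs c 1
            omega
          rw [hZ1get, hidx, hdrop_app])
      hnd
      (by intro j; rw [hix j]; simp)
      (by intro j _ hbit
          rw [hLc j hbit, chunk_append hbs1 (by omega) hbit])
    obtain ⟨hc1, hc2, hc3, hc4, hc5⟩ := hcas
    rw [hstep]
    refine ⟨?_, ?_, ?_, ?_, ?_, ?_⟩
    · dsimp only; rw [hc'] ; exact hc1
    · dsimp only; rw [hc', List.length_set]; exact hc2
    · dsimp only
      rw [getD_set_self (by rw [hc2]; omega), hc']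
      have hd : (done ++ [t]).drop (bs * (c + 1)) = [] :=
        List.drop_eq_nil_of_le (by omega)
      rw [hd]
      rfl
    · dsimp only; exact hc3
    · dsimp only; intro j; rw [hc']; exact hc4 j
    · dsimp only; intro j hbit; rw [hc'] at hbit ⊢; exact hc5 j hbit
  · -- no flush
    have hcond : ¬ ((((Z1.getD 0 []).length : Nat) : Int) = B) := by
      rw [hlen1, hBeq]
      intro hcc
      exact htr (Int.natCast_inj.mp hcc)
    have hstep : logicA t B (L, Z, ix) = (L, Z1, ix) := by
      simp only [logicA]
      rw [← hZ1def, if_neg hcond]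
    have hc' : (done ++ [t]).length / bs = c := by
      simp only [List.length_append, List.length_singleton]
      have h1 : n + 1 = bs * c + (r + 1) := by omega
      rw [h1, Nat.mul_add_div (by omega : 0 < bs), Nat.div_eq_of_lt (by omega)]
      omega
    rw [hstep]
    refine ⟨?_, ?_, ?_, ?_, ?_, ?_⟩
    · dsimp only; rw [hc']; exact hL
    · dsimp only; rw [hc', hZ1len]; exact hZ
    · dsimp only; rw [hc', hZ1get, hdrop_app]
    · exact hnd
    · dsimp only; intro j; rw [hc']; exact hix j
    · dsimp only
      intro j hbit
      rw [hc'] at hbit ⊢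
      rw [hLc j hbit, chunk_append hbs1 (by omega) hbit]

lemma fold_inv (B : Int) (hbs : 1 ≤ B) :
    ∀ (rest done : List Int) (L Z : List (List Int)) (ix : PySem.Dict Int Bool),
    StInv B.toNat done L Z ix →
    StInv B.toNat (done ++ rest)
      (rest.foldl (fun s t => logicA t B s) (L, Z, ix)).1
      (rest.foldl (fun s t => logicA t B s) (L, Z, ix)).2.1
      (rest.foldl (fun s t => logicA t B s) (L, Z, ix)).2.2 := by
  intro rest
  induction rest with
  | nil =>
    intro done L Z ix h
    simpa using h
  | cons t rest ih =>
    intro done L Z ix h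
    have hstep := step_spec B hbs done t L Z ix h
    rcases hp : logicA t B (L, Z, ix) with ⟨L1, Z1, ix1⟩
    rw [hp] at hstep
    have := ih (done ++ [t]) L1 Z1 ix1 hstep
    simp only [List.foldl_cons, hp]
    simpa [List.append_assoc] using this

lemma runsDesc_spec (tk : List Int) (bs c : Nat) :
    ∀ (i pos : Nat), pos = bs * (2 ^ i * (c / 2 ^ i)) →
    runsDesc tk bs c i pos =
      ((List.range i).reverse.map
        (fun j => if c.testBit j then sortedI (chunk tk bs c j) else []), bs * c) := by
  intro i
  induction i with
  | zero =>
    intro pos h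
    rw [pow_zero, Nat.div_one, one_mul] at h
    simp [runsDesc, h]
  | succ i ih =>
    intro pos h
    have hdd : c / 2 ^ i / 2 = c / 2 ^ (i + 1) := by
      rw [Nat.div_div_eq_div_mul, pow_succ]
    have hq : c / 2 ^ i = 2 * (c / 2 ^ (i + 1)) + c / 2 ^ i % 2 := by
      rw [← hdd]
      omega
    simp only [runsDesc]
    by_cases hbit : c.testBit i
    · have hb1 : c / 2 ^ i % 2 = 1 := by
        rw [Nat.testBit_eq_decide_div_mod_eq] at hbit
        exact of_decide_eq_true hbit
      have hpos' : pos + bs * 2 ^ i = bs * (2 ^ i * (c / 2 ^ i)) := by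
        rw [h]
        have he : 2 ^ i * (c / 2 ^ i) = 2 ^ (i + 1) * (c / 2 ^ (i + 1)) + 2 ^ i := by
          rw [hq, hb1, pow_succ]
          ring
        rw [he, Nat.mul_add]
      rw [if_pos hbit, ih (pos + bs * 2 ^ i) hpos']
      have hchunk : chunk tk bs c i = (tk.drop pos).take (bs * 2 ^ i) := by
        simp only [chunk]
        rw [← h]
      simp [List.range_succ, hbit, hchunk, sortedI]
    · have hb0 : c / 2 ^ i % 2 = 0 := by
        have hbitf : c.testBit i = false := by
          cases hx : c.testBit i
          · rfl
          · exact absurd hx hbit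
        rw [Nat.testBit_eq_decide_div_mod_eq] at hbitf
        have := of_decide_eq_false hbitf
        omega
      have hpos' : pos = bs * (2 ^ i * (c / 2 ^ i)) := by
        rw [h]
        congr 1
        rw [hq, hb0, pow_succ]
        ring
      rw [if_neg hbit, ih pos hpos']
      simp [List.range_succ, hbit]

lemma fold_triv (B : Int) (hB : B < 1) :
    ∀ (rest done : List Int),
    (rest.foldl (fun s t => logicA t B s) ([[]], [sortedI done], PySem.Dict.empty)) =
      ([[]], [sortedI (done ++ rest)], PySem.Dict.empty) := by
  intro rest
  induction rest with
  | nil => intro done; simp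
  | cons t rest ih =>
    intro done
    have hmerge : mergeA (sortedI done) [t] = sortedI (done ++ [t]) := by
      rw [mergeA_eq]
      exact sortedI_perm_eq ((PySem.List.sorted_perm _ _ false).append (List.Perm.refl [t]))
    have hlen : (sortedI (done ++ [t])).length = done.length + 1 := by
      rw [length_sortedI, List.length_append, List.length_singleton]
    have hstep : logicA t B ([[]], [sortedI done], PySem.Dict.empty)
        = ([[]], [sortedI (done ++ [t])], PySem.Dict.empty) := by
      simp only [logicA]
      have hset : ([sortedI done] : List (List Int)).set 0 (mergeA (([sortedI done] : List (List Int)).getD 0 []) [t])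
          = [sortedI (done ++ [t])] := by
        simp [hmerge]
      rw [hset]
      rw [if_neg]
      intro hcc
      rw [List.getD_cons_zero, hlen] at hcc
      omega
    rw [List.foldl_cons, hstep, ih (done ++ [t])]
    simp [List.append_assoc]

lemma main_eq (index : List Int) (cut_off : Int) (buffer_size : Int) :
    Logarithmic_merge index cut_off buffer_size = Logarithmic_merge_alt index cut_off buffer_size := by
  simp only [Logarithmic_merge, Logarithmic_merge_alt]
  set tk := PySem.List.slice index none (some cut_off) with htk
  by_cases hbuf : buffer_size < 1
  · rw [if_pos hbuf]
    have hf : tk.foldl (fun s t => logicA t buffer_size s) ([[]], [[]], PySem.Dict.empty)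
        = ([[]], [sortedI tk], PySem.Dict.empty) := by
      have h := fold_triv buffer_size hbuf tk []
      simpa [show sortedI ([] : List Int) = [] from rfl] using h
    rw [hf]
    simp [PySem.Dict.contains_empty, sortedI, List.range_succ]
  · rw [if_neg hbuf]
    have hbs : 1 ≤ buffer_size := by omega
    set bs := buffer_size.toNat with hbsdef
    have hInv0 : StInv bs [] [[]] [[]] PySem.Dict.empty := by
      refine ⟨?_, ?_, ?_, ?_, ?_, ?_⟩
      · simp
      · simp
      · simp [List.drop_nil, show sortedI ([] : List Int) = [] from rfl]
      · simp [PySem.Dict.keys, PySem.Dict.empty]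
      · intro j; simp [PySem.Dict.contains_empty, Nat.zero_testBit, Nat.zero_div]
      · intro j hj; simp [Nat.zero_testBit, Nat.zero_div] at hj
    have h := fold_inv buffer_size hbs tk [] [[]] [[]] PySem.Dict.empty hInv0
    simp only [List.nil_append] at h
    obtain ⟨hL, hZ, hZ0, hnd, hix, hLc⟩ := h
    set c := tk.length / bs with hcdef
    set levels := max 1 (Nat.size c) with hlevels
    have hclt : c < 2 ^ levels := by
      have h1 : c < 2 ^ Nat.size c := Nat.size_le.1 (Nat.le_refl _)
      have h2 : (2:Nat) ^ Nat.size c ≤ 2 ^ levels :=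
        Nat.pow_le_pow_right (by norm_num) (by omega)
      omega
    have hrd := runsDesc_spec tk bs c levels 0
      (by rw [Nat.div_eq_of_lt hclt]; simp)
    rw [hrd]
    dsimp only
    rw [← hbsdef] at hZ0 hLc
    apply congrArg₂ List.cons
    · rw [hZ0]; rfl
    · rw [hL, ← List.map_reverse, List.reverse_reverse]
      apply List.map_congr_left
      intro i hi
      rw [hix i]
      cases hbit : c.testBit i
      · simp
      · simp only [if_pos]
        exact hLc i hbit

-- ===== VERDICT (by name: the statement is the Claim_ definition above) =====
theorem Logarithmic_merge_spec : Claim_equal_Logarithmic_merge := by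
  intro index cut_off buffer_size _
  exact main_eq index cut_off buffer_size
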